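-- pv_equiv track=rewrite | github.com/padaher93/agent-app | src/agent_app_dataset/source_grounding.py | is_structured_locator
-- ===== SOURCE A (Python) =====
-- def is_structured_locator(locator_type: str, locator_value: str) -> bool:
--     kind = str(locator_type or "").strip().lower()
--     value = str(locator_value or "").strip()
--     if not kind or not value:
--         return False
--
--     lowered = value.lower()
--     if lowered.startswith("unresolved:") or lowered.startswith("inferred:"):
--         return False
--     if "missing" in lowered:
--         return False
--
--     if kind == "cell":
--         if len(value) < 2:
--             return False
--         letters = []
--         digits = []
--         for char in value:
--             if char.isalpha() and not digits:
--                 letters.append(char)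
--             elif char.isdigit():
--                 digits.append(char)
--             else:
--                 return False
--         return bool(letters and digits)
--
--     return kind in {"paragraph", "line", "bbox"}
-- ===== SOURCE B (Python) =====
-- def is_structured_locator(locator_type: str, locator_value: str) -> bool:
--     kind = str(locator_type or "").strip().lower()
--     value = str(locator_value or "").strip()
--     if not kind or not value:
--         return False
--
--     lowered = value.lower()
--     if lowered.startswith(("unresolved:", "inferred:")) or "missing" in lowered:
--         return False
--
--     if kind != "cell":
--         return kind in {"paragraph", "line", "bbox"}
--
--     i = 0
--     while i < len(value) and value[i].isalpha():
--         i += 1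
--     letters, digits = value[:i], value[i:]
--     return bool(letters) and bool(digits) and all(c.isdigit() for c in digits)
-- ===== Notes on version B (the rewrite author's own statement) =====
-- stated objective: simpler
-- what changed: The 'cell' branch's stateful char-by-char loop with letters/digits accumulators (and the len<2 guard) is replaced by a partition at the first non-alphabetic index: letters = value[:i], digits = value[i:], then both-nonempty and all-digits checks; the two prefix tests and the 'missing' test are merged into one guard.
import Mathlib
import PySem

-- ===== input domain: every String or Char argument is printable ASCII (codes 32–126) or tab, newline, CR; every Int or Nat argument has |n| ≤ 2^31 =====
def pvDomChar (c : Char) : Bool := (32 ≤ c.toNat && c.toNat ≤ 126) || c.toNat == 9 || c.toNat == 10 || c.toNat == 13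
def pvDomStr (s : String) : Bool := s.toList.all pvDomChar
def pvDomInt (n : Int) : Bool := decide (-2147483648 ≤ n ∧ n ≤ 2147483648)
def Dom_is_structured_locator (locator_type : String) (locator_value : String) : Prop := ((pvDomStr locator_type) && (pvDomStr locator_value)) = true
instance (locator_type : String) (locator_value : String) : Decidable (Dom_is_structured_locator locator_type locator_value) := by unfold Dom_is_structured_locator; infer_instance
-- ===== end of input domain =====

-- B replaces A's stateful letters/digits accumulator loop (and its len<2 guard) in the 'cell'
-- branch by a partition at the first non-alphabetic character, then simple emptiness/all-digit checks.

-- ===== PORT A =====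
-- the 'for char in value' loop, carrying the letters/digits accumulators; 'return False' = false
def pvACellLoop : List Char → List Char → List Char → Bool
  | [], letters, digits => !letters.isEmpty && !digits.isEmpty
  | c :: rest, letters, digits =>
    if PySem.Chars.isalpha c && digits.isEmpty then
      pvACellLoop rest (letters ++ [c]) digits
    else if PySem.Chars.isdigit c then
      pvACellLoop rest letters (digits ++ [c])
    else false

def is_structured_locator (locator_type : String) (locator_value : String) : Bool :=
  let kind := PySem.Chars.lower (PySem.Chars.strip locator_type.toList)
  let value := PySem.Chars.strip locator_value.toList
  if kind.isEmpty || value.isEmpty then false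
  else
    let lowered := PySem.Chars.lower value
    if PySem.Chars.startswith lowered "unresolved:".toList
        || PySem.Chars.startswith lowered "inferred:".toList then false
    else if PySem.Chars.isIn "missing".toList lowered then false
    else if kind == "cell".toList then
      if value.length < 2 then false
      else pvACellLoop value [] []
    else kind == "paragraph".toList || kind == "line".toList || kind == "bbox".toList

-- ===== PORT B =====
-- Source B's index scan 'while i < len(value) and value[i].isalpha()' + the two slices, as one split
def pvBSplit : List Char → List Char × List Char
  | [] => ([], [])
  | c :: rest =>
    if PySem.Chars.isalpha c then
      let p := pvBSplit rest
      (c :: p.1, p.2)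
    else ([], c :: rest)

def is_structured_locator_alt (locator_type : String) (locator_value : String) : Bool :=
  let kind := PySem.Chars.lower (PySem.Chars.strip locator_type.toList)
  let value := PySem.Chars.strip locator_value.toList
  if kind.isEmpty || value.isEmpty then false
  else
    let lowered := PySem.Chars.lower value
    if (PySem.Chars.startswith lowered "unresolved:".toList
          || PySem.Chars.startswith lowered "inferred:".toList)
        || PySem.Chars.isIn "missing".toList lowered then false
    else if kind != "cell".toList then
      kind == "paragraph".toList || kind == "line".toList || kind == "bbox".toList
    else
      let p := pvBSplit value
      !p.1.isEmpty && !p.2.isEmpty && p.2.all PySem.Chars.isdigit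

-- ===== PRECONDITION & SPEC =====
def Spec_is_structured_locator (locator_type : String) (locator_value : String) (out : Bool) : Prop := out = is_structured_locator_alt locator_type locator_value
instance (locator_type : String) (locator_value : String) (out : Bool) : Decidable (Spec_is_structured_locator locator_type locator_value out) := by unfold Spec_is_structured_locator; infer_instance

-- ===== CLAIM (what is proved, stated in full; the proofs are below) =====
def Claim_equal_is_structured_locator : Prop := ∀ (locator_type : String) (locator_value : String), Dom_is_structured_locator locator_type locator_value → Spec_is_structured_locator locator_type locator_value (is_structured_locator locator_type locator_value)

-- ===== LEMMAS AND PROOFS =====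

-- once a digit is seen, A's loop only accepts digits and never grows letters
lemma pvACellLoop_digits_nonempty (cs : List Char) : ∀ letters digits : List Char,
    digits ≠ [] →
    pvACellLoop cs letters digits = (cs.all PySem.Chars.isdigit && !letters.isEmpty) := by
  induction cs with
  | nil =>
    intro letters digits hd
    simp [pvACellLoop, List.isEmpty_eq_false_iff.mpr hd, Bool.and_comm]
  | cons c rest ih =>
    intro letters digits hd
    have hde : digits.isEmpty = false := List.isEmpty_eq_false_iff.mpr hd
    by_cases hdc : PySem.Chars.isdigit c = true
    · simp [pvACellLoop, hde, hdc, ih letters (digits ++ [c]) (by simp)]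
    · simp [pvACellLoop, hde, hdc]

-- A's loop from an all-letters state equals B's partition check
lemma pvACellLoop_eq_split (cs : List Char) : ∀ letters : List Char,
    pvACellLoop cs letters [] =
      ((!letters.isEmpty || !(pvBSplit cs).1.isEmpty) && !(pvBSplit cs).2.isEmpty
        && (pvBSplit cs).2.all PySem.Chars.isdigit) := by
  induction cs with
  | nil => intro letters; simp [pvACellLoop, pvBSplit]
  | cons c rest ih =>
    intro letters
    by_cases ha : PySem.Chars.isalpha c = true
    · have hne : (letters ++ [c]).isEmpty = false := by simp
      simp [pvACellLoop, pvBSplit, ha, ih (letters ++ [c]), hne]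
    · by_cases hd : PySem.Chars.isdigit c = true
      · simp [pvACellLoop, pvBSplit, ha, hd,
          pvACellLoop_digits_nonempty rest letters [c] (by simp), Bool.and_comm]
      · simp [pvACellLoop, pvBSplit, ha, hd]

-- A's len<2 guard is subsumed by B's emptiness checks
lemma pvCell_eq (cs : List Char) :
    (if cs.length < 2 then false else pvACellLoop cs [] []) =
      (!(pvBSplit cs).1.isEmpty && !(pvBSplit cs).2.isEmpty
        && (pvBSplit cs).2.all PySem.Chars.isdigit) := by
  match cs with
  | [] => simp [pvBSplit]
  | [c] => by_cases h : PySem.Chars.isalpha c = true <;> simp [pvBSplit, h]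
  | c :: d :: rest =>
    have : (c :: d :: rest).length < 2 ↔ False := by simp
    rw [if_neg (by simp), pvACellLoop_eq_split (c :: d :: rest) []]
    simp

-- the guard tails agree for every value of the shared boolean atoms
lemma pvTail_eq (kind value : List Char) (s m : Bool) :
    (if s then false
     else if m then false
     else if kind == "cell".toList then
       (if value.length < 2 then false else pvACellLoop value [] [])
     else kind == "paragraph".toList || kind == "line".toList || kind == "bbox".toList) =
    (if s || m then false
     else if kind != "cell".toList then
       kind == "paragraph".toList || kind == "line".toList || kind == "bbox".toList
     else !(pvBSplit value).1.isEmpty && !(pvBSplit value).2.isEmpty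
       && (pvBSplit value).2.all PySem.Chars.isdigit) := by
  cases s
  · cases m
    · simp only [Bool.or_self, Bool.false_eq_true, if_false]
      by_cases hc : kind = ['c', 'e', 'l', 'l']
      · simpa [hc] using pvCell_eq value
      · simp [hc]
    · simp
  · simp

-- ===== VERDICT (by name: the statement is the Claim_ definition above) =====
theorem is_structured_locator_spec : Claim_equal_is_structured_locator := by
  intro lt lv _
  unfold Spec_is_structured_locator is_structured_locator is_structured_locator_alt
  dsimp only
  by_cases h0 : (((PySem.Chars.lower (PySem.Chars.strip lt.toList)).isEmpty
      || (PySem.Chars.strip lv.toList).isEmpty)) = true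
  · simp only [h0, if_true]
  · rw [if_neg h0, if_neg h0]
    exact pvTail_eq _ _ _ _
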